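-- pv_equiv track=rewrite | github.com/paradiselabs-ai/GLUE-fw | src/glue/utils/json_utils.py | fix_typos
-- ===== SOURCE A (Python) =====
-- def fix_typos(json_str: str) -> str:
--     """
--     Fixes common typos in JSON keys.
--
--     Args:
--         json_str: The JSON string to fix.
--
--     Returns:
--         A string with fixed typos.
--     """
--     typos = {
--         "parame": "parameters",
--         "target_type": "target_type",  # Add known typo mappings
--         "arguement": "arguments",
--         "argumets": "arguments",
--         "tool_call": "tool_name",
--         "toolname": "tool_name",
--         "toolcall": "tool_name",
--         "functio": "function",
--         "paramter": "parameter"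
--     }
--
--     for typo, correction in typos.items():
--         json_str = json_str.replace(f'"{typo}"', f'"{correction}"')
--
--     return json_str
-- ===== SOURCE B (Python) =====
-- def fix_typos(json_str: str) -> str:
--     """
--     Fixes common typos in JSON keys.
--
--     Args:
--         json_str: The JSON string to fix.
--
--     Returns:
--         A string with fixed typos.
--     """
--     typos = {
--         "parame": "parameters",
--         "target_type": "target_type",  # Add known typo mappings
--         "arguement": "arguments",
--         "argumets": "arguments",
--         "tool_call": "tool_name",
--         "toolname": "tool_name",
--         "toolcall": "tool_name",
--         "functio": "function",
--         "paramter": "parameter"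
--     }
--
--     parts = json_str.split('"')
--     last = len(parts) - 1
--     return '"'.join(
--         typos.get(p, p) if 0 < i < last else p
--         for i, p in enumerate(parts)
--     )
-- ===== Notes on version B (the rewrite author's own statement) =====
-- stated objective: idiomatic
-- what changed: B splits the string once on the double-quote character and maps each fully-quoted segment through the typo dict before rejoining, one pass over a segment list, instead of A's nine full-string replace passes.
-- outside the precondition, e.g. on fix_typos('"parame"parame"'): A returns '"parameters"parame"', B returns '"parameters"parameters"'
import Mathlib
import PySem

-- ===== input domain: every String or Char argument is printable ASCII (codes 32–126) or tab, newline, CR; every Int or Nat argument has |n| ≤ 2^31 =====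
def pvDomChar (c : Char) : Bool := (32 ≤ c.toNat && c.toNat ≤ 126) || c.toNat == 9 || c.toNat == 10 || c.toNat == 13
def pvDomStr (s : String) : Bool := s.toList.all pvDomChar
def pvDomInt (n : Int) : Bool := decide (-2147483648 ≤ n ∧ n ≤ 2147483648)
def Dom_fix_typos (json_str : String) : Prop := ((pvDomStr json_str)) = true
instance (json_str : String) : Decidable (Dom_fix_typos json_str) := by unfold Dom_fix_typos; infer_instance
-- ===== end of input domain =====

-- B replaces A's nine sequential full-string `.replace` passes by one split on the
-- double-quote character with a dict lookup per quoted segment (objective: idiomatic).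

-- ===== PORT A =====
-- typos = { ... }  (the literal dict both A and B build)
def typosD : PySem.Dict String String := PySem.Dict.mk
  [("parame", "parameters"), ("target_type", "target_type"), ("arguement", "arguments"),
   ("argumets", "arguments"), ("tool_call", "tool_name"), ("toolname", "tool_name"),
   ("toolcall", "tool_name"), ("functio", "function"), ("paramter", "parameter")]

def fix_typos (json_str : String) : String :=
  let typos : PySem.Dict String String := typosD
  -- for typo, correction in typos.items(): json_str = json_str.replace(f'"{typo}"', f'"{correction}"')
  typos.items.foldl
    (fun s tc => PySem.Str.replace s ("\"" ++ tc.1 ++ "\"") ("\"" ++ tc.2 ++ "\"")) json_str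


-- ===== PORT B =====
def fix_typos_alt (json_str : String) : String :=
  let typos : PySem.Dict String String := typosD
  -- parts = json_str.split('"')   (('"' ≠ "", so split? is `some`)
  let parts : List String := (PySem.Str.split? json_str "\"").getD []
  -- last = len(parts) - 1
  let last : Int := (parts.length : Int) - 1
  -- '"'.join(typos.get(p, p) if 0 < i < last else p for i, p in enumerate(parts))
  PySem.Str.join "\""
    ((PySem.List.enumerate parts).map
      (fun ip => if 0 < ip.1 ∧ ip.1 < last then typos.getD ip.2 ip.2 else ip.2))


-- ===== PRECONDITION & SPEC =====
-- Pre_ excludes strings in which two quoted occurrences of the same (non-identity) typo key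
-- share a quote character (quote, key, quote, same key, quote): there A's str.replace scan skips every other
-- overlapping occurrence while B rewrites every quoted segment — a corner  neither behaviour
-- of which is specified; on all other inputs the two agree exactly.
def Pre_fix_typos (json_str : String) : Prop :=
  PySem.Str.isIn "\"parame\"parame\"" json_str = false ∧
  PySem.Str.isIn "\"arguement\"arguement\"" json_str = false ∧
  PySem.Str.isIn "\"argumets\"argumets\"" json_str = false ∧
  PySem.Str.isIn "\"tool_call\"tool_call\"" json_str = false ∧
  PySem.Str.isIn "\"toolname\"toolname\"" json_str = false ∧
  PySem.Str.isIn "\"toolcall\"toolcall\"" json_str = false ∧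
  PySem.Str.isIn "\"functio\"functio\"" json_str = false ∧
  PySem.Str.isIn "\"paramter\"paramter\"" json_str = false

instance (json_str : String) : Decidable (Pre_fix_typos json_str) := by
  unfold Pre_fix_typos; infer_instance

def pvWitness_fix_typos : String := "{\"parame\": 1, \"functio\"parame\"}"

def Spec_fix_typos (json_str : String) (out : String) : Prop := out = fix_typos_alt json_str
instance (json_str : String) (out : String) : Decidable (Spec_fix_typos json_str out) := by
  unfold Spec_fix_typos; infer_instance

-- ===== CLAIM (what is proved, stated in full; the proofs are below) =====
def Claim_equal_fix_typos : Prop := ∀ (json_str : String), Dom_fix_typos json_str → Pre_fix_typos json_str → Spec_fix_typos json_str (fix_typos json_str)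

-- ===== LEMMAS AND PROOFS =====
def repl (p1 : Char) (pr rep : List Char) : List Char → List Char
  | [] => []
  | c :: t =>
    if (p1 :: pr).isPrefixOf (c :: t) then rep ++ repl p1 pr rep (t.drop pr.length)
    else c :: repl p1 pr rep t
termination_by l => l.length
decreasing_by
  · simp [List.length_drop]
  · simp

theorem replace_go_eq (p1 : Char) (pr rep : List Char) :
    ∀ fuel l acc, l.length ≤ fuel →
      PySem.Chars.replace.go (p1 :: pr) rep fuel l acc = acc.reverse ++ repl p1 pr rep l := by
  intro fuel
  induction fuel with
  | zero => intro l acc h; interval_cases hl : l.length <;> simp_all [PySem.Chars.replace.go, List.length_eq_zero_iff.mp hl, repl]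
  | succ n ih =>
    intro l acc h
    cases l with
    | nil => simp [PySem.Chars.replace.go, repl]
    | cons c t =>
      rw [PySem.Chars.replace.go]
      by_cases hp : (p1 :: pr).isPrefixOf (c :: t)
      · simp only [hp, if_true]
        rw [ih _ _ (by simp at h ⊢; omega)]
        simp [repl, hp]
      · simp only [hp, Bool.false_eq_true]
        rw [ih t _ (Nat.le_of_succ_le_succ h)]
        simp [repl, hp]

theorem replace_eq_repl (s : List Char) (p1 : Char) (pr rep : List Char) :
    PySem.Chars.replace s (p1 :: pr) rep = repl p1 pr rep s := by
  have := replace_go_eq p1 pr rep s.length s []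
  simpa [PySem.Chars.replace] using this

def splitC : List Char → List (List Char)
  | [] => [[]]
  | c :: t => if c = '"' then [] :: splitC t else (splitC t).modifyHead (c :: ·)

theorem splitC_ne_nil (l : List Char) : splitC l ≠ [] := by
  induction l with
  | nil => simp [splitC]
  | cons c t ih => by_cases h : c = '"' <;> simp [splitC, h] <;> cases hs : splitC t <;> simp_all

theorem splitOn_go_eq :
    ∀ fuel l cur acc, l.length ≤ fuel →
      PySem.Chars.splitOn.go ['"'] fuel l cur acc
        = acc.reverse ++ (splitC l).modifyHead (cur.reverse ++ ·) := by
  intro fuel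
  induction fuel with
  | zero =>
    intro l cur acc h
    have : l = [] := List.length_eq_zero_iff.mp (Nat.le_zero.mp h)
    subst this; simp [PySem.Chars.splitOn.go, splitC]
  | succ n ih =>
    intro l cur acc h
    cases l with
    | nil => simp [PySem.Chars.splitOn.go, splitC]
    | cons c t =>
      rw [PySem.Chars.splitOn.go]
      by_cases hq : c = '"'
      · have hp : List.isPrefixOf ['"'] (c :: t) = true := by simp [List.isPrefixOf, hq]
        simp only [hp, if_true]
        rw [ih _ _ _ (by simp at h ⊢; omega)]
        cases hs : splitC t <;> simp [splitC, hq, hs]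
      · have hp : List.isPrefixOf ['"'] (c :: t) = false := by simp [List.isPrefixOf]; exact fun hh => hq hh.symm
        simp only [hp, Bool.false_eq_true, if_false]
        rw [ih t _ _ (Nat.le_of_succ_le_succ h)]
        rcases hs : splitC t with _ | ⟨q, qs⟩
        · exact absurd hs (splitC_ne_nil t)
        · simp [splitC, hq, hs]

theorem splitOn_eq_splitC (l : List Char) : PySem.Chars.splitOn l ['"'] = splitC l := by
  have := splitOn_go_eq (l.length + 1) l [] []
  simp only [PySem.Chars.splitOn]
  rw [this (by omega)]
  rcases hs : splitC l with _ | ⟨q, qs⟩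
  · exact absurd hs (splitC_ne_nil l)
  · simp

def joinQ (ps : List (List Char)) : List Char := List.intercalate ['"'] ps

theorem joinQ_cons (p : List Char) (ps : List (List Char)) (h : ps ≠ []) :
    joinQ (p :: ps) = p ++ '"' :: joinQ ps := by
  rcases ps with _ | ⟨q, qs⟩
  · exact absurd rfl h
  · simp [joinQ, List.intercalate, List.intersperse]

theorem joinQ_singleton (p : List Char) : joinQ [p] = p := by simp [joinQ, List.intercalate, List.intersperse]

theorem joinQ_splitC (l : List Char) : joinQ (splitC l) = l := by
  induction l with
  | nil => simp [splitC, joinQ, List.intercalate, List.intersperse]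
  | cons c t ih =>
    by_cases hq : c = '"'
    · rw [splitC, if_pos hq, joinQ_cons _ _ (splitC_ne_nil t), ih, hq]; rfl
    · rw [splitC, if_neg hq]
      rcases hs : splitC t with _ | ⟨q, qs⟩
      · exact absurd hs (splitC_ne_nil t)
      · rcases qs with _ | ⟨r, rs⟩
        · simpa [joinQ_singleton] using by rw [hs, joinQ_singleton] at ih; simpa using ih
        · rw [List.modifyHead]
          rw [joinQ_cons _ _ (by simp), List.cons_append]
          rw [hs, joinQ_cons _ _ (by simp)] at ih
          simp [ih]

theorem splitC_qf (l : List Char) : ∀ p ∈ splitC l, '"' ∉ p := by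
  induction l with
  | nil => simp [splitC]
  | cons c t ih =>
    by_cases hq : c = '"'
    · simpa [splitC, hq] using ih
    · rcases hs : splitC t with _ | ⟨q, qs⟩
      · exact absurd hs (splitC_ne_nil t)
      · rw [splitC, if_neg hq, hs, List.modifyHead_cons]
        intro p hp
        rcases List.mem_cons.mp hp with hp | hp
        · subst hp
          have := ih q (by rw [hs]; simp)
          simpa using ⟨fun he => hq he.symm, this⟩
        · exact ih p (by rw [hs]; exact List.mem_cons_of_mem _ hp)

def mapIT {α : Type} (f : α → α) : List α → List α
  | [] => []
  | [p] => [p]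
  | p :: q :: tl => f p :: mapIT f (q :: tl)

theorem mapIT_cons {α : Type} (f : α → α) (p : α) (tl : List α) (h : tl ≠ []) :
    mapIT f (p :: tl) = f p :: mapIT f tl := by
  rcases tl with _ | ⟨q, qs⟩
  · exact absurd rfl h
  · rfl

theorem mapIT_ne_nil {α : Type} (f : α → α) (tl : List α) (h : tl ≠ []) : mapIT f tl ≠ [] := by
  rcases tl with _ | ⟨q, qs⟩
  · exact absurd rfl h
  · rcases qs with _ | _ <;> simp [mapIT]

theorem mapIT_congr {α : Type} (f g : α → α) (tl : List α) (h : ∀ p ∈ tl, f p = g p) :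
    mapIT f tl = mapIT g tl := by
  induction tl with
  | nil => rfl
  | cons p qs ih =>
    rcases qs with _ | ⟨q, rs⟩
    · rfl
    · rw [mapIT_cons f p (q :: rs) (by simp), mapIT_cons g p (q :: rs) (by simp), h p (by simp),
        ih (fun x hx => h x (List.mem_cons_of_mem _ hx))]

theorem mapIT_comp {α : Type} (f g : α → α) (tl : List α) :
    mapIT f (mapIT g tl) = mapIT (fun p => f (g p)) tl := by
  induction tl with
  | nil => rfl
  | cons p qs ih =>
    rcases qs with _ | ⟨q, rs⟩
    · rfl
    · rw [mapIT_cons g p (q :: rs) (by simp), mapIT_cons f (g p) (mapIT g (q :: rs)) (mapIT_ne_nil g (q :: rs) (by simp)),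
        mapIT_cons (fun p => f (g p)) p (q :: rs) (by simp), ih]

theorem mapIT_id {α : Type} (tl : List α) : mapIT (fun p => p) tl = tl := by
  induction tl with
  | nil => rfl
  | cons p qs ih =>
    rcases qs with _ | ⟨q, rs⟩
    · rfl
    · rw [mapIT_cons (fun p => p) p (q :: rs) (by simp), ih]

theorem mem_mapIT {α : Type} (f : α → α) (tl : List α) (p : α) (h : p ∈ mapIT f tl) :
    p ∈ tl ∨ ∃ q ∈ tl, p = f q := by
  induction tl with
  | nil => simp [mapIT] at h
  | cons a qs ih =>
    rcases qs with _ | ⟨q, rs⟩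
    · simp [mapIT] at h; exact Or.inl (by simp [h])
    · rw [mapIT_cons f a (q :: rs) (by simp)] at h
      rcases List.mem_cons.mp h with h | h
      · exact Or.inr ⟨a, by simp, h⟩
      · rcases ih h with h' | ⟨b, hb, hb'⟩
        · exact Or.inl (List.mem_cons_of_mem _ h')
        · exact Or.inr ⟨b, List.mem_cons_of_mem _ hb, hb'⟩

-- a quote-free block is copied verbatim (the pattern starts with '"')
theorem repl_append_qf (pr rep : List Char) (p : List Char) (hq : '"' ∉ p) (l : List Char) :
    repl '"' pr rep (p ++ l) = p ++ repl '"' pr rep l := by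
  induction p with
  | nil => simp
  | cons c t ih =>
    have hc : c ≠ '"' := fun h => hq (by simp [h])
    have hnp : ('"' :: pr).isPrefixOf (c :: (t ++ l)) = false := by
      simp [List.isPrefixOf]; exact fun h => absurd h.symm hc
    rw [List.cons_append, repl, if_neg (by simp [hnp])]
    simp [ih (fun h => hq (List.mem_cons_of_mem _ h))]

theorem repl_qf (pr rep : List Char) (p : List Char) (hq : '"' ∉ p) :
    repl '"' pr rep p = p := by
  simpa [repl] using repl_append_qf pr rep p hq []

-- alignment of quoted patterns: quote-free u, v
theorem quoted_prefix_eq (u : List Char) (hu : '"' ∉ u) :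
    ∀ v x y, '"' ∉ v → (u ++ '"' :: x) <+: (v ++ '"' :: y) → u = v := by
  induction u with
  | nil =>
    intro v x y hv h
    rcases v with _ | ⟨b, v'⟩
    · rfl
    · rcases List.cons_prefix_cons.mp (by simpa using h) with ⟨h1, _⟩
      exact absurd h1.symm (fun hb => hv (by simp [hb]))
  | cons a u' ih =>
    intro v x y hv h
    rcases v with _ | ⟨b, v'⟩
    · rcases List.cons_prefix_cons.mp (by simpa using h) with ⟨h1, _⟩
      exact absurd h1 (fun hb => hu (by simp [hb]))
    · rcases List.cons_prefix_cons.mp (by simpa using h) with ⟨h1, h2⟩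
      rw [h1, ih (fun hh => hu (List.mem_cons_of_mem _ hh)) v' x y
        (fun hh => hv (List.mem_cons_of_mem _ hh)) h2]

theorem repl_self (p1 : Char) (pr : List Char) : ∀ l, repl p1 pr (p1 :: pr) l = l := by
  intro l
  induction hn : l.length using Nat.strong_induction_on generalizing l with
  | _ n ih =>
    rcases l with _ | ⟨c, t⟩
    · simp [repl]
    · by_cases hp : (p1 :: pr).isPrefixOf (c :: t)
      · rcases (List.isPrefixOf_iff_prefix.mp hp) with ⟨rest, hrest⟩
        rw [repl, if_pos hp]
        have hc : c = p1 := by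
          have := congrArg (·.headI) hrest; simpa using this.symm
        have ht : t = pr ++ rest := by
          have := congrArg (·.tail) hrest; simpa using this.symm
        subst hn
        rw [ht, List.drop_left' rfl, ih (rest.length) (by simp [ht]) rest rfl]
        simp [hc, ht]
      · rw [repl, if_neg hp]
        subst hn
        rw [ih t.length (by simp) t rfl]

-- no two adjacent interior segments (segments followed by something) both equal k
def noAdjI (k : List Char) : List (List Char) → Prop
  | a :: b :: c :: tl => ¬(a = k ∧ b = k) ∧ noAdjI k (b :: c :: tl)
  | _ => True

theorem noAdjI_tail (k : List Char) (p : List Char) (tl : List (List Char))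
    (h : noAdjI k (p :: tl)) : noAdjI k tl := by
  rcases tl with _ | ⟨q, qs⟩
  · trivial
  · rcases qs with _ | ⟨r, rs⟩
    · trivial
    · exact h.2

-- the quoted pattern matches at a quote iff the following segment equals k and is followed by a quote
theorem match_iff (k p : List Char) (hk : '"' ∉ k) (hp : '"' ∉ p) (tl : List (List Char)) :
    ('"' :: (k ++ ['"'])).isPrefixOf ('"' :: joinQ (p :: tl)) = true ↔ (p = k ∧ tl ≠ []) := by
  constructor
  · intro h
    have h' := List.isPrefixOf_iff_prefix.mp h
    rcases tl with _ | ⟨q, qs⟩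
    · exfalso
      rw [joinQ_singleton] at h'
      have h2 : (k ++ ['"']) <+: p := (List.cons_prefix_cons.mp h').2
      exact hp (h2.subset (by simp))
    · rw [joinQ_cons _ _ (by simp)] at h'
      have h2 : (k ++ '"' :: []) <+: (p ++ '"' :: joinQ (q :: qs)) := by
        simpa using (List.cons_prefix_cons.mp h').2
      exact ⟨(quoted_prefix_eq k hk p [] (joinQ (q :: qs)) hp h2).symm, by simp⟩
  · rintro ⟨hpk, htl⟩
    subst hpk
    rw [joinQ_cons _ _ htl]
    apply List.isPrefixOf_iff_prefix.mpr
    refine List.cons_prefix_cons.mpr ⟨rfl, ?_⟩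
    simpa using List.prefix_append ..

theorem passQuote (k c : List Char) (hk : '"' ∉ k) (hc : '"' ∉ c) :
    ∀ tl : List (List Char), (∀ p ∈ tl, '"' ∉ p) → noAdjI k tl →
      repl '"' (k ++ ['"']) ('"' :: (c ++ ['"'])) ('"' :: joinQ tl)
        = '"' :: joinQ (mapIT (fun p => if p = k then c else p) tl) := by
  intro tl
  induction hn : tl.length using Nat.strong_induction_on generalizing tl with
  | _ n ih =>
    intro hqf hadj
    rcases tl with _ | ⟨p, tl'⟩
    · rw [repl, if_neg (by simp [List.isPrefixOf_iff_prefix, joinQ, List.intercalate])]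
      simp [joinQ, mapIT, repl, List.intercalate]
    · have hqp : '"' ∉ p := hqf p (by simp)
      by_cases hm : p = k ∧ tl' ≠ []
      · rcases hm with ⟨hpk, htl'⟩
        rw [repl, if_pos ((match_iff k p hk hqp tl').mpr ⟨hpk, htl'⟩)]
        rw [joinQ_cons _ _ htl', hpk]
        have hdrop : ((k ++ '"' :: joinQ tl').drop (k ++ ['"']).length) = joinQ tl' := by
          have h2 : k ++ '"' :: joinQ tl' = (k ++ ['"']) ++ joinQ tl' := by simp
          rw [h2, List.drop_left]
        rw [hdrop]
        rcases tl' with _ | ⟨q, qs⟩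
        · exact absurd rfl htl'
        · have hqq : '"' ∉ q := hqf q (by simp)
          rcases qs with _ | ⟨r, rs⟩
          · rw [joinQ_singleton, repl_qf _ _ q hqq]
            rw [show mapIT (fun p => if p = k then c else p) (k :: [q])
                  = (if k = k then c else k) :: [q] from rfl, if_pos rfl]
            rw [joinQ_cons _ _ (by simp), joinQ_singleton]
            simp
          · have hqk : q ≠ k := fun h => hadj.1 ⟨hpk, h⟩
            rw [joinQ_cons _ _ (by simp), repl_append_qf _ _ q hqq]
            rw [ih (r :: rs).length (by subst hn; simp) (r :: rs) rfl
              (fun x hx => hqf x (by simp [hx]))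
              (noAdjI_tail k q _ (noAdjI_tail k p _ hadj))]
            rw [show mapIT (fun p => if p = k then c else p) (k :: q :: r :: rs)
                  = (if k = k then c else k) :: (if q = k then c else q)
                      :: mapIT (fun p => if p = k then c else p) (r :: rs) from rfl,
              if_pos rfl, if_neg hqk]
            rw [joinQ_cons _ _ (by simp), joinQ_cons _ _ (mapIT_ne_nil _ _ (by simp))]
            simp
      · rw [repl, if_neg (by
          intro hcontra
          exact hm ((match_iff k p hk hqp tl').mp (by simpa using hcontra)))]
        rcases tl' with _ | ⟨q, qs⟩
        · rw [joinQ_singleton, repl_qf _ _ p hqp, mapIT, joinQ_singleton]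
        · have hpk : p ≠ k := fun h => hm ⟨h, by simp⟩
          rw [joinQ_cons _ _ (by simp), repl_append_qf _ _ p hqp]
          rw [ih (q :: qs).length (by subst hn; simp) (q :: qs) rfl
            (fun x hx => hqf x (by simp [hx])) (noAdjI_tail k p _ hadj)]
          rw [show mapIT (fun x => if x = k then c else x) (p :: q :: qs)
                = (if p = k then c else p) :: mapIT (fun x => if x = k then c else x) (q :: qs) from rfl,
            if_neg hpk]
          rw [joinQ_cons p (mapIT (fun x => if x = k then c else x) (q :: qs)) (mapIT_ne_nil _ _ (by simp))]

def applyT (T : List (List Char × List Char)) (p : List Char) : List Char :=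
  T.foldl (fun p kc => if p = kc.1 then kc.2 else p) p

theorem noAdjI_mapIT (k' : List Char) (f : List Char → List Char)
    (hf : ∀ p, f p = k' → p = k') :
    ∀ tl, noAdjI k' tl → noAdjI k' (mapIT f tl) := by
  intro tl
  induction tl with
  | nil => intro _; trivial
  | cons p qs ih =>
    intro h
    rcases qs with _ | ⟨q, rs⟩
    · trivial
    · rcases rs with _ | ⟨r, ss⟩
      · trivial
      · rw [mapIT_cons f p (q :: r :: ss) (by simp), mapIT_cons f q (r :: ss) (by simp)]
        obtain ⟨y, ys, hy⟩ := List.exists_cons_of_ne_nil (mapIT_ne_nil f (r :: ss) (by simp))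
        rw [hy]
        refine ⟨fun hc => h.1 ⟨hf p hc.1, hf q hc.2⟩, ?_⟩
        have h2 := ih h.2
        rw [mapIT_cons f q (r :: ss) (by simp), hy] at h2
        exact h2

theorem foldl_repl_qf (p0 : List Char) (hq : '"' ∉ p0) :
    ∀ T : List (List Char × List Char),
      T.foldl (fun l kc => repl '"' (kc.1 ++ ['"']) ('"' :: (kc.2 ++ ['"'])) l) p0 = p0 := by
  intro T
  induction T with
  | nil => rfl
  | cons kc T' ih => simpa [repl_qf _ _ p0 hq] using ih

theorem foldPasses :
    ∀ (T : List (List Char × List Char)) (p0 : List Char) (tl : List (List Char)),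
      (∀ kc ∈ T, '"' ∉ kc.1 ∧ '"' ∉ kc.2) →
      List.Pairwise (fun x y => x.2 ≠ y.1) T →
      '"' ∉ p0 → (∀ p ∈ tl, '"' ∉ p) →
      (∀ kc ∈ T, kc.2 ≠ kc.1 → noAdjI kc.1 tl) →
      T.foldl (fun l kc => repl '"' (kc.1 ++ ['"']) ('"' :: (kc.2 ++ ['"'])) l) (joinQ (p0 :: tl))
        = joinQ (p0 :: mapIT (applyT T) tl) := by
  intro T
  induction T with
  | nil =>
    intro p0 tl _ _ _ _ _
    rw [List.foldl_nil, mapIT_congr (applyT []) (fun p => p) tl (fun p _ => rfl), mapIT_id]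
  | cons kc T' ih =>
    intro p0 tl hT hpw hq0 hqtl hch
    rcases tl with _ | ⟨t0, ttl⟩
    · rw [joinQ_singleton]
      rw [foldl_repl_qf p0 hq0]
      simp [mapIT, joinQ_singleton]
    · obtain ⟨k, c⟩ := kc
      have hkq : '"' ∉ k := (hT (k, c) (by simp)).1
      have hcq : '"' ∉ c := (hT (k, c) (by simp)).2
      have hstep :
          repl '"' (k ++ ['"']) ('"' :: (c ++ ['"'])) (joinQ (p0 :: t0 :: ttl))
            = joinQ (p0 :: mapIT (fun p => if p = k then c else p) (t0 :: ttl)) := by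
        by_cases hck : c = k
        · subst hck
          have h1 : ('"' :: (c ++ ['"'])) = ('"' :: (c ++ ['"'])) := rfl
          rw [show ('"' :: (c ++ ['"'])) = ('"' :: (c ++ ['"'])) from rfl]
          rw [show repl '"' (c ++ ['"']) ('"' :: (c ++ ['"'])) (joinQ (p0 :: t0 :: ttl))
                = joinQ (p0 :: t0 :: ttl) from repl_self '"' (c ++ ['"']) _]
          congr 1
          rw [mapIT_congr (fun p => if p = c then c else p) (fun p => p) _ (by
            intro p _; by_cases hpc : p = c <;> simp [hpc]), mapIT_id]
        · have hadj := hch (k, c) (by simp) (by simpa using hck)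
          rw [joinQ_cons _ _ (by simp), repl_append_qf _ _ p0 hq0]
          rw [passQuote k c hkq hcq (t0 :: ttl) hqtl hadj]
          rw [joinQ_cons _ _ (mapIT_ne_nil _ _ (by simp))]
      rw [List.foldl_cons, hstep]
      rw [ih p0 (mapIT (fun p => if p = k then c else p) (t0 :: ttl))
        (fun x hx => hT x (by simp [hx])) hpw.tail hq0
        (by
          intro p hp
          rcases mem_mapIT _ _ p hp with h | ⟨q, hq, hq'⟩
          · exact hqtl p h
          · by_cases hqk : q = k
            · rw [hq', hqk]; simpa using hcq
            · rw [hq']; simpa [hqk] using hqtl q hq)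
        (by
          intro kc' hkc' hne
          have hck : c ≠ kc'.1 := (List.pairwise_cons.mp hpw).1 kc' hkc'
          refine noAdjI_mapIT kc'.1 _ (fun p hp => ?_) (t0 :: ttl) (hch kc' (by simp [hkc']) hne)
          by_cases hpk : p = k
          · simp [hpk] at hp; exact absurd hp hck
          · simpa [hpk] using hp)]
      congr 2
      rw [mapIT_comp]
      exact mapIT_congr _ _ _ (fun p _ => by simp only [applyT, List.foldl_cons])

theorem joinQ_append (xs ys : List (List Char)) (hx : xs ≠ []) (hy : ys ≠ []) :
    joinQ (xs ++ ys) = joinQ xs ++ '"' :: joinQ ys := by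
  induction xs with
  | nil => exact absurd rfl hx
  | cons x xs' ih =>
    rcases xs' with _ | ⟨x2, xs''⟩
    · rw [List.cons_append, List.nil_append, joinQ_cons _ _ hy, joinQ_singleton]
    · rw [List.cons_append, joinQ_cons _ _ (by simp), joinQ_cons _ _ (by simp),
        ih (by simp)]
      simp

theorem adj_of_not_noAdjI (k : List Char) :
    ∀ tl, ¬ noAdjI k tl → ∃ u v, tl = u ++ k :: k :: v ∧ v ≠ [] := by
  intro tl
  induction tl with
  | nil => intro h; exact absurd trivial h
  | cons a qs ih =>
    intro h
    rcases qs with _ | ⟨b, rs⟩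
    · exact absurd trivial h
    · rcases rs with _ | ⟨r, ss⟩
      · exact absurd trivial h
      · by_cases hab : a = k ∧ b = k
        · exact ⟨[], r :: ss, by simp [hab.1, hab.2], by simp⟩
        · have h2 : ¬ noAdjI k (b :: r :: ss) := fun hh => h ⟨hab, hh⟩
          obtain ⟨u, v, huv, hv⟩ := ih h2
          exact ⟨a :: u, v, by simp [huv], hv⟩

theorem noAdjI_of_not_isIn (k l : List Char)
    (h : PySem.Chars.isIn ('"' :: (k ++ '"' :: (k ++ ['"']))) l = false) :
    ∀ p0 tl, splitC l = p0 :: tl → noAdjI k tl := by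
  intro p0 tl hsp
  by_contra hadj
  obtain ⟨u, v, huv, hv⟩ := adj_of_not_noAdjI k tl hadj
  have hl : l = joinQ ((p0 :: u) ++ (k :: k :: v)) := by
    have h0 : l = joinQ (p0 :: tl) := by rw [← hsp, joinQ_splitC]
    rw [h0, huv]; simp
  rw [joinQ_append (p0 :: u) (k :: k :: v) (by simp) (by simp),
    joinQ_cons k (k :: v) (by simp), joinQ_cons k v hv] at hl
  have : ('"' :: (k ++ '"' :: (k ++ ['"']))) <:+: l := by
    refine ⟨joinQ (p0 :: u), joinQ v, ?_⟩
    rw [hl]; simp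
  have h2 := (PySem.Chars.isIn_iff_infix ('"' :: (k ++ '"' :: (k ++ ['"']))) l).mpr this
  rw [h2] at h
  simp at h

theorem enumMap_aux {α : Type} (f : α → α) :
    ∀ (tl : List α) (j B : Int), 1 ≤ j → j + tl.length = B + 1 →
      (PySem.List.enumerate tl j).map
        (fun ip => if 0 < ip.1 ∧ ip.1 < B then f ip.2 else ip.2) = mapIT f tl := by
  intro tl
  induction tl with
  | nil => intro j B _ _; simp [PySem.List.enumerate_nil, mapIT]
  | cons p tl' ih =>
    intro j B hj hB
    rw [PySem.List.enumerate_cons, List.map_cons]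
    rcases tl' with _ | ⟨q, qs⟩
    · have : ¬ (0 < j ∧ j < B) := by simp at hB; omega
      rw [if_neg this]
      simp [PySem.List.enumerate_nil, mapIT]
    · have hcond : 0 < j ∧ j < B := by simp at hB; omega
      rw [if_pos hcond, mapIT_cons f p (q :: qs) (by simp)]
      rw [ih (j + 1) B (by omega) (by simp at hB ⊢; omega)]

theorem enumMap {α : Type} (f : α → α) (p0 : α) (tl : List α) :
    (PySem.List.enumerate (p0 :: tl)).map
      (fun ip => if 0 < ip.1 ∧ ip.1 < ((p0 :: tl).length : Int) - 1 then f ip.2 else ip.2)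
      = p0 :: mapIT f tl := by
  rw [PySem.List.enumerate_cons, List.map_cons, if_neg (by omega)]
  rw [show (0 : Int) + 1 = 1 from rfl,
    enumMap_aux f tl 1 (((p0 :: tl).length : Int) - 1) (by omega) (by simp; omega)]

theorem map_toList_mapIT (f : String → String) (f' : List Char → List Char)
    (hf : ∀ p, (f p).toList = f' p.toList) :
    ∀ ps : List String, (mapIT f ps).map String.toList = mapIT f' (ps.map String.toList) := by
  intro ps
  induction ps with
  | nil => rfl
  | cons p qs ih =>
    rcases qs with _ | ⟨q, rs⟩
    · rfl
    · rw [mapIT_cons f p (q :: rs) (by simp), List.map_cons, List.map_cons,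
        mapIT_cons f' p.toList (List.map String.toList (q :: rs)) (by simp), hf, ih]


def TL : List (List Char × List Char) :=
  [("parame".toList, "parameters".toList), ("target_type".toList, "target_type".toList),
   ("arguement".toList, "arguments".toList), ("argumets".toList, "arguments".toList),
   ("tool_call".toList, "tool_name".toList), ("toolname".toList, "tool_name".toList),
   ("toolcall".toList, "tool_name".toList), ("functio".toList, "function".toList),
   ("paramter".toList, "parameter".toList)]

theorem quoted_toList (k : String) :
    ("\"" ++ k ++ "\"").toList = '"' :: (k.toList ++ ['"']) := by
  rw [String.toList_append, String.toList_append,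
    show ("\"" : String).toList = ['"'] from by decide]
  simp

theorem fixA_toList (s : String) :
    (fix_typos s).toList
      = TL.foldl (fun l kc => repl '"' (kc.1 ++ ['"']) ('"' :: (kc.2 ++ ['"'])) l) s.toList := by
  simp only [fix_typos, typosD, PySem.Dict.items, List.foldl_cons, List.foldl_nil,
    PySem.Str.toList_replace, quoted_toList, TL]
  simp only [show ∀ (t : List Char) (rep l : List Char),
      PySem.Chars.replace l ('"' :: (t ++ ['"'])) rep = repl '"' (t ++ ['"']) rep l from
    fun t rep l => replace_eq_repl l '"' (t ++ ['"']) rep]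

theorem getD_applyT (p : String) : (typosD.getD p p).toList = applyT TL p.toList := by
  by_cases h1 : p = "parame"; · subst h1; decide
  by_cases h2 : p = "target_type"; · subst h2; decide
  by_cases h3 : p = "arguement"; · subst h3; decide
  by_cases h4 : p = "argumets"; · subst h4; decide
  by_cases h5 : p = "tool_call"; · subst h5; decide
  by_cases h6 : p = "toolname"; · subst h6; decide
  by_cases h7 : p = "toolcall"; · subst h7; decide
  by_cases h8 : p = "functio"; · subst h8; decide
  by_cases h9 : p = "paramter"; · subst h9; decide
  have hL : typosD.getD p p = p := by
    apply PySem.Dict.getD_of_not_contains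
    simp [typosD, PySem.Dict.contains_mk]
    refine ⟨?_, ?_, ?_, ?_, ?_, ?_, ?_, ?_, ?_⟩ <;>
      first
        | exact fun h => h1 h.symm | exact fun h => h2 h.symm | exact fun h => h3 h.symm
        | exact fun h => h4 h.symm | exact fun h => h5 h.symm | exact fun h => h6 h.symm
        | exact fun h => h7 h.symm | exact fun h => h8 h.symm | exact fun h => h9 h.symm
  rw [hL]
  simp only [applyT, TL, List.foldl_cons, List.foldl_nil]
  rw [if_neg (fun h => h1 (String.toList_inj.mp h)), if_neg (fun h => h2 (String.toList_inj.mp h)),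
    if_neg (fun h => h3 (String.toList_inj.mp h)), if_neg (fun h => h4 (String.toList_inj.mp h)),
    if_neg (fun h => h5 (String.toList_inj.mp h)), if_neg (fun h => h6 (String.toList_inj.mp h)),
    if_neg (fun h => h7 (String.toList_inj.mp h)), if_neg (fun h => h8 (String.toList_inj.mp h)),
    if_neg (fun h => h9 (String.toList_inj.mp h))]

theorem fixB_toList (s : String) (p0 : List Char) (tl : List (List Char))
    (hsp : splitC s.toList = p0 :: tl) :
    (fix_typos_alt s).toList = joinQ (p0 :: mapIT (applyT TL) tl) := by
  have hq : ("\"" : String).toList = ['"'] := by decide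
  obtain ⟨ps, hps, hmap⟩ : ∃ ps, PySem.Str.split? s "\"" = some ps ∧
      ps.map String.toList = splitC s.toList := by
    have hb := PySem.Str.split?_map s "\""
    rw [hq] at hb
    rw [PySem.Chars.split?, if_neg (by simp), splitOn_eq_splitC] at hb
    rcases hps : PySem.Str.split? s "\"" with _ | ps
    · rw [hps] at hb; simp at hb
    · rw [hps] at hb; simp at hb; exact ⟨ps, rfl, hb⟩
  rcases ps with _ | ⟨q0, qtl⟩
  · rw [hsp] at hmap; simp at hmap
  · rw [List.map_cons, hsp] at hmap
    have hq0 : q0.toList = p0 := (List.cons.injEq .. ▸ hmap).1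
    have hqtl : qtl.map String.toList = tl := (List.cons.injEq .. ▸ hmap).2
    simp only [fix_typos_alt, hps, Option.getD_some]
    rw [enumMap (fun p => typosD.getD p p) q0 qtl]
    rw [PySem.Str.toList_join, hq]
    rw [show ∀ X, PySem.Chars.join ['"'] X = joinQ X from fun X => rfl]
    rw [List.map_cons, hq0,
      map_toList_mapIT _ (applyT TL) getD_applyT qtl, hqtl]

theorem main_eq (s : String) (hpre : Pre_fix_typos s) : fix_typos s = fix_typos_alt s := by
  obtain ⟨p0, tl, hsp⟩ : ∃ p0 tl, splitC s.toList = p0 :: tl := by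
    rcases hs : splitC s.toList with _ | ⟨p0, tl⟩
    · exact absurd hs (splitC_ne_nil _)
    · exact ⟨p0, tl, rfl⟩
  apply String.toList_inj.mp
  rw [fixA_toList, fixB_toList s p0 tl hsp]
  have hself : s.toList = joinQ (p0 :: tl) := by rw [← hsp, joinQ_splitC]
  rw [hself]
  apply foldPasses TL p0 tl (by decide) (by decide)
  · exact splitC_qf s.toList p0 (by rw [hsp]; simp)
  · exact fun p hp => splitC_qf s.toList p (by rw [hsp]; simp [hp])
  · intro kc hkc hne
    obtain ⟨h1, h2, h3, h4, h5, h6, h7, h8⟩ := hpre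
    have hstep : ∀ (k : List Char) (pat : String),
        pat.toList = '"' :: (k ++ '"' :: (k ++ ['"'])) →
        PySem.Str.isIn pat s = false → noAdjI k tl := by
      intro k pat hpat hfalse
      refine noAdjI_of_not_isIn k s.toList ?_ p0 tl hsp
      rw [← hpat, ← PySem.Str.isIn_eq]
      exact hfalse
    fin_cases hkc
    · exact hstep _ "\"parame\"parame\"" (by decide) h1
    · exact absurd rfl hne
    · exact hstep _ "\"arguement\"arguement\"" (by decide) h2
    · exact hstep _ "\"argumets\"argumets\"" (by decide) h3
    · exact hstep _ "\"tool_call\"tool_call\"" (by decide) h4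
    · exact hstep _ "\"toolname\"toolname\"" (by decide) h5
    · exact hstep _ "\"toolcall\"toolcall\"" (by decide) h6
    · exact hstep _ "\"functio\"functio\"" (by decide) h7
    · exact hstep _ "\"paramter\"paramter\"" (by decide) h8

-- ===== VERDICT (by name: the statement is the Claim_ definition above) =====
theorem fix_typos_spec : Claim_equal_fix_typos := by
  intro json_str _ hpre
  unfold Spec_fix_typos
  exact main_eq json_str hpre
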